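-- pv_equiv track=rewrite | github.com/meksym/solutions | task3.py | find
-- ===== SOURCE A (Python) =====
-- def find(number: int) -> int:
--     steps = 0
--
--     while number != 0:
--         max_digit = number % 10
--         current_number = number // 10
--
--         while current_number != 0:
--             digit = current_number % 10
--             if digit > max_digit:
--                 max_digit = digit
--
--             current_number //= 10
--
--         number -= max_digit
--         steps += 1
--
--     return steps
-- ===== SOURCE B (Python) =====
-- # Block-crossing re-implementation: instead of re-scanning all digits and
-- # subtracting once per step, each outer iteration computes the max digit of the
-- # higher part once and batches all steps needed to drop below the tens boundary.
-- def _max_digit(n):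
--     if n < 10:
--         return n
--     d = n % 10
--     m = _max_digit(n // 10)
--     return m if m > d else d
--
-- def find(number: int) -> int:
--     steps = 0
--     while number >= 10:
--         last = number % 10
--         mh = _max_digit(number // 10)
--         if last > mh:
--             number -= last
--             steps += 1
--         else:
--             k = last // mh + 1
--             number -= k * mh
--             steps += k
--     if number != 0:
--         steps += 1
--     return steps
-- ===== Notes on version B (the rewrite author's own statement) =====
-- stated objective: alternative
-- what changed: Replaces A's one-subtraction-per-iteration nested while loops by a block-crossing loop with a recursive max-digit helper: each iteration computes the max digit of the higher part once and batches (via k = last // mh + 1) all subtractions needed to drop below the current tens boundary.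
import Mathlib
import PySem

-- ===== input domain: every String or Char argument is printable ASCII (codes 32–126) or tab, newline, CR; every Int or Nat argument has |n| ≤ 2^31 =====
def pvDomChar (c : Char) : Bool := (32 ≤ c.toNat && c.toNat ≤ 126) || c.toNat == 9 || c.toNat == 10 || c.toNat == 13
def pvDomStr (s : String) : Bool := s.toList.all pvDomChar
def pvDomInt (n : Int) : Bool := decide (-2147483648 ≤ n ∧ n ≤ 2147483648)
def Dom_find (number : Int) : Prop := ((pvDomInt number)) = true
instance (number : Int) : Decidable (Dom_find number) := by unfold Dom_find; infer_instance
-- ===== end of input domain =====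

-- B replaces A's one-subtraction-per-step nested whiles by a block-crossing loop that
-- batches the steps needed to drop below each tens boundary (objective: alternative).

-- divmod facts used by the termination proofs below
theorem pvDivmod10 (n : Int) :
    PySem.Int.floordiv n 10 * 10 + PySem.Int.mod n 10 = n ∧
    0 ≤ PySem.Int.mod n 10 ∧ PySem.Int.mod n 10 < 10 := by
  refine ⟨PySem.Int.floordiv_mul_add_mod n 10, ?_, ?_⟩
  · rw [PySem.Int.mod_eq_emod_of_pos (show (0:Int) < 10 by norm_num)]
    exact Int.emod_nonneg n (by norm_num)
  · rw [PySem.Int.mod_eq_emod_of_pos (show (0:Int) < 10 by norm_num)]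
    exact Int.emod_lt_of_pos n (by norm_num)

theorem pvFloordiv10_lt (n : Int) (h : 0 < n) :
    (PySem.Int.floordiv n 10).toNat < n.toNat := by
  have hd := pvDivmod10 n
  omega

-- ===== PORT A =====
-- A's inner while: scan the digits of cur, keeping the largest seen.
-- (the 'cur ≤ 0' guard only makes the Lean function total: Python compares cur ≠ 0
-- and diverges for cur < 0, which is outside Pre_find)
def findInner (cur maxd : Int) : Int :=
  if cur ≤ 0 then maxd
  else
    let digit := PySem.Int.mod cur 10
    findInner (PySem.Int.floordiv cur 10) (if digit > maxd then digit else maxd)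
termination_by cur.toNat
decreasing_by exact pvFloordiv10_lt cur (by omega)

-- findInner result is ≥ its accumulator, and ≥ 1 once cur is positive
theorem findInner_ge_aux : ∀ (N : Nat) (cur maxd : Int), cur.toNat ≤ N →
    maxd ≤ findInner cur maxd := by
  intro N
  induction N with
  | zero =>
    intro cur maxd h
    rw [findInner, if_pos (by omega : cur ≤ 0)]
  | succ N ih =>
    intro cur maxd h
    rw [findInner]
    split
    · exact le_refl _
    · have hd := pvDivmod10 cur
      have hlt := pvFloordiv10_lt cur (by omega)
      calc maxd ≤ (if PySem.Int.mod cur 10 > maxd then PySem.Int.mod cur 10 else maxd) := by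
            split <;> omega
        _ ≤ _ := ih _ _ (by omega)

theorem findInner_ge (cur maxd : Int) : maxd ≤ findInner cur maxd :=
  findInner_ge_aux cur.toNat cur maxd (le_refl _)

theorem findInner_pos_aux : ∀ (N : Nat) (cur maxd : Int), 0 < cur → cur.toNat ≤ N →
    1 ≤ findInner cur maxd := by
  intro N
  induction N with
  | zero => intro cur maxd hc h; omega
  | succ N ih =>
    intro cur maxd hc h
    rw [findInner, if_neg (by omega : ¬ cur ≤ 0)]
    have hd := pvDivmod10 cur
    have hlt := pvFloordiv10_lt cur hc
    by_cases hq : 0 < PySem.Int.floordiv cur 10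
    · exact ih _ _ hq (by omega)
    · have hq0 : PySem.Int.floordiv cur 10 = 0 := by omega
      have hmodc : PySem.Int.mod cur 10 = cur := by omega
      rw [hq0, findInner, if_pos (le_refl (0:Int))]
      rw [hmodc]
      split <;> omega

theorem findInner_call_pos (n : Int) (h : 0 < n) :
    1 ≤ findInner (PySem.Int.floordiv n 10) (PySem.Int.mod n 10) := by
  have hd := pvDivmod10 n
  by_cases hq : 0 < PySem.Int.floordiv n 10
  · exact findInner_pos_aux _ _ _ hq (le_refl _)
  · have := findInner_ge (PySem.Int.floordiv n 10) (PySem.Int.mod n 10)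
    omega

-- A's outer while (the 'number < 0' guard only makes the function total: Python
-- diverges for negative number, which is outside Pre_find)
def findLoop (number steps : Int) : Int :=
  if number = 0 then steps
  else if number < 0 then steps
  else
    findLoop (number - findInner (PySem.Int.floordiv number 10) (PySem.Int.mod number 10))
      (steps + 1)
termination_by number.toNat
decreasing_by
  have := findInner_call_pos number (by omega)
  omega

def find (number : Int) : Int := findLoop number 0

-- ===== PORT B =====
-- B's recursive _max_digit helper
def maxDigitRec (n : Int) : Int :=
  if n < 10 then n
  else
    let d := PySem.Int.mod n 10
    let m := maxDigitRec (PySem.Int.floordiv n 10)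
    if m > d then m else d
termination_by n.toNat
decreasing_by exact pvFloordiv10_lt n (by omega)

theorem maxDigitRec_bounds_aux : ∀ (N : Nat) (n : Int), 0 ≤ n → n.toNat ≤ N →
    (1 ≤ n → 1 ≤ maxDigitRec n) ∧ 0 ≤ maxDigitRec n ∧ maxDigitRec n ≤ 9 := by
  intro N
  induction N with
  | zero =>
    intro n hn h
    have hn0 : n = 0 := by omega
    subst hn0
    rw [maxDigitRec, if_pos (by norm_num : (0:Int) < 10)]
    omega
  | succ N ih =>
    intro n hn h
    rw [maxDigitRec]
    split
    · omega
    · have hd := pvDivmod10 n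
      have hlt := pvFloordiv10_lt n (by omega)
      have ihq := ih (PySem.Int.floordiv n 10) (by omega) (by omega)
      refine ⟨?_, ?_, ?_⟩ <;> · dsimp only; split <;> omega

theorem maxDigitRec_bounds (n : Int) (h : 0 ≤ n) :
    (1 ≤ n → 1 ≤ maxDigitRec n) ∧ 0 ≤ maxDigitRec n ∧ maxDigitRec n ≤ 9 :=
  maxDigitRec_bounds_aux n.toNat n h (le_refl _)

-- B's batched while loop; the final 'if number != 0: steps += 1' of Source B is the
-- base case (the loop exits exactly when number < 10)
def findAltLoop (number steps : Int) : Int :=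
  if number < 10 then (if number ≠ 0 then steps + 1 else steps)
  else
    let last := PySem.Int.mod number 10
    let mh := maxDigitRec (PySem.Int.floordiv number 10)
    if last > mh then findAltLoop (number - last) (steps + 1)
    else
      let k := PySem.Int.floordiv last mh + 1
      findAltLoop (number - k * mh) (steps + k)
termination_by number.toNat
decreasing_by
  · have hd := pvDivmod10 number
    have hb := maxDigitRec_bounds (PySem.Int.floordiv number 10) (by omega)
    omega
  · have hd := pvDivmod10 number
    have hb := maxDigitRec_bounds (PySem.Int.floordiv number 10) (by omega)
    have hmh : 1 ≤ maxDigitRec (PySem.Int.floordiv number 10) := hb.1 (by omega)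
    have hknn : 0 ≤ PySem.Int.floordiv (PySem.Int.mod number 10)
        (maxDigitRec (PySem.Int.floordiv number 10)) := by
      rw [PySem.Int.floordiv_eq_ediv_of_pos (by omega)]
      exact Int.ediv_nonneg (by omega) (by omega)
    have hprod : 1 ≤ (PySem.Int.floordiv (PySem.Int.mod number 10)
        (maxDigitRec (PySem.Int.floordiv number 10)) + 1) *
        maxDigitRec (PySem.Int.floordiv number 10) := by nlinarith
    omega

def find_alt (number : Int) : Int := findAltLoop number 0

-- ===== PRECONDITION & SPEC =====
-- Pre_ excludes negative inputs: there A's inner while never terminates (Python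
-- diverges and returns nothing), so nothing is claimed about them.
def Pre_find (number : Int) : Prop := 0 ≤ number
instance (number : Int) : Decidable (Pre_find number) := by unfold Pre_find; infer_instance
def pvWitness_find : Int := 37
def Spec_find (number : Int) (out : Int) : Prop := out = find_alt number
instance (number : Int) (out : Int) : Decidable (Spec_find number out) := by unfold Spec_find; infer_instance

-- ===== CLAIM (what is proved, stated in full; the proofs are below) =====
def Claim_equal_find : Prop := ∀ (number : Int), Dom_find number → Pre_find number → Spec_find number (find number)

-- ===== LEMMAS AND PROOFS =====

-- A's inner loop computes the max of B's recursive max digit and the accumulator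
theorem findInner_eq_max_aux : ∀ (N : Nat) (cur maxd : Int), 0 < cur → 0 ≤ maxd →
    cur.toNat ≤ N → findInner cur maxd = max (maxDigitRec cur) maxd := by
  intro N
  induction N with
  | zero => intro cur maxd hc hm h; omega
  | succ N ih =>
    intro cur maxd hc hm h
    rw [findInner, if_neg (by omega : ¬ cur ≤ 0)]
    have hd := pvDivmod10 cur
    have hlt := pvFloordiv10_lt cur hc
    by_cases hq : 0 < PySem.Int.floordiv cur 10
    · have hm' : (0:Int) ≤ if PySem.Int.mod cur 10 > maxd then PySem.Int.mod cur 10 else maxd := by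
        split <;> omega
      rw [ih _ _ hq hm' (by omega)]
      conv_rhs => rw [maxDigitRec, if_neg (by omega : ¬ cur < 10)]
      dsimp only
      split <;> split <;> omega
    · have hq0 : PySem.Int.floordiv cur 10 = 0 := by omega
      have hmodc : PySem.Int.mod cur 10 = cur := by omega
      rw [hq0, findInner, if_pos (le_refl (0:Int)), hmodc]
      rw [maxDigitRec, if_pos (by omega : cur < 10)]
      split <;> omega

theorem findInner_eq_max (cur maxd : Int) (hc : 0 < cur) (hm : 0 ≤ maxd) :
    findInner cur maxd = max (maxDigitRec cur) maxd :=
  findInner_eq_max_aux cur.toNat cur maxd hc hm (le_refl _)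

-- mod/floordiv of the exact multiple q*10
theorem pvMod_mul10 (q : Int) : PySem.Int.mod (q * 10) 10 = 0 := by
  rw [PySem.Int.mod_eq_emod_of_pos (show (0:Int) < 10 by norm_num)]
  simp

theorem pvFloordiv_mul10 (q : Int) : PySem.Int.floordiv (q * 10) 10 = q := by
  rw [PySem.Int.floordiv_eq_ediv_of_pos (show (0:Int) < 10 by norm_num)]
  exact Int.mul_ediv_cancel q (by norm_num)

-- floordiv last mh for 0 ≤ last ≤ mh is 0 or 1
theorem pvFloordiv_small (last mh : Int) (h0 : 0 ≤ last) (h1 : 1 ≤ mh) (h2 : last ≤ mh) :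
    PySem.Int.floordiv last mh = if last = mh then 1 else 0 := by
  rw [PySem.Int.floordiv_eq_ediv_of_pos (by omega : (0:Int) < mh)]
  split
  · subst last; exact Int.ediv_self (by omega)
  · exact Int.ediv_eq_zero_of_lt h0 (by omega)

theorem main_loop_eq (N : Nat) : ∀ (n s : Int), 0 ≤ n → n.toNat ≤ N →
    findLoop n s = findAltLoop n s := by
  induction N with
  | zero =>
    intro n s hn hN
    have hn0 : n = 0 := by omega
    subst hn0
    rw [findLoop, findAltLoop]
    norm_num
  | succ N ih =>
    intro n s hn hN
    by_cases h0 : n = 0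
    · subst h0; rw [findLoop, findAltLoop]; norm_num
    have hd := pvDivmod10 n
    by_cases h10 : n < 10
    · -- single digit: A subtracts n itself; B's base case gives steps + 1
      have hq0 : PySem.Int.floordiv n 10 = 0 := by
        have := pvFloordiv10_lt n (by omega)
        omega
      have hrn : PySem.Int.mod n 10 = n := by omega
      rw [findLoop, if_neg h0, if_neg (by omega : ¬ n < 0)]
      rw [hq0, hrn, findInner, if_pos (le_refl (0:Int))]
      rw [sub_self]
      rw [findLoop, if_pos rfl]
      rw [findAltLoop, if_pos h10, if_pos h0]
    · -- n ≥ 10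
      have hqpos : 0 < PySem.Int.floordiv n 10 := by omega
      have hmb := maxDigitRec_bounds (PySem.Int.floordiv n 10) (by omega)
      set q := PySem.Int.floordiv n 10 with hq
      set r := PySem.Int.mod n 10 with hr
      set mh := maxDigitRec q with hmh
      have hmh1 : 1 ≤ mh := hmb.1 (by omega)
      have hmh9 : mh ≤ 9 := hmb.2.2
      have hinner : findInner q r = max mh r := findInner_eq_max q r hqpos (by omega)
      rw [findLoop, if_neg h0, if_neg (by omega : ¬ n < 0), hinner]
      rw [findAltLoop, if_neg h10]
      simp only [← hq, ← hr, ← hmh]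
      by_cases hlm : r > mh
      · -- one step, subtract the last digit
        rw [if_pos hlm]
        have hmax : max mh r = r := by omega
        rw [hmax]
        exact ih (n - r) (s + 1) (by omega) (by omega)
      · rw [if_neg hlm]
        have hmax : max mh r = mh := by omega
        rw [hmax]
        have hfd := pvFloordiv_small r mh (by omega) hmh1 (by omega)
        by_cases heq : r = mh
        · -- k = 2 : two A-steps cross the boundary
          rw [hfd, if_pos heq]
          have hn' : n - mh = q * 10 := by omega
          rw [findLoop, if_neg (by omega : ¬ n - mh = 0), if_neg (by omega : ¬ n - mh < 0)]
          rw [hn', pvFloordiv_mul10, pvMod_mul10]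
          have hinner2 : findInner q 0 = max mh 0 := findInner_eq_max q 0 hqpos (le_refl _)
          rw [hinner2]
          have hmax0 : max mh 0 = mh := by omega
          rw [hmax0]
          have harg : q * 10 - mh = n - (1 + 1) * mh := by omega
          have harg2 : s + 1 + 1 = s + (1 + 1) := by omega
          rw [harg, harg2]
          exact ih (n - (1 + 1) * mh) (s + (1 + 1)) (by omega) (by omega)
        · -- k = 1 : a single A-step already crosses the boundary
          rw [hfd, if_neg heq]
          have h01 : ((0:Int) + 1) * mh = mh := by ring
          have h02 : s + (0 + 1) = s + 1 := by ring
          rw [h01, h02]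
          exact ih (n - mh) (s + 1) (by omega) (by omega)

-- ===== VERDICT (by name: the statement is the Claim_ definition above) =====
theorem find_spec : Claim_equal_find := by
  intro number _ hpre
  unfold Spec_find find find_alt
  exact main_loop_eq number.toNat number 0 hpre (le_refl _)
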